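-- pv_equiv track=rewrite | github.com/LukasSales/Projeto_PIBIC | Gerador_histograma.py | construir_histograma_excluir
-- ===== SOURCE A (Python) =====
-- def construir_histograma_excluir(string):
--     histograma = {}
--     for char in string:
--         if char in histograma:
--             histograma[char] += 1
--         else:
--             histograma[char] = 1
--     return histograma
-- ===== SOURCE B (Python) =====
-- def construir_histograma_excluir(string):
--     return {char: string.count(char) for char in dict.fromkeys(string)}
-- ===== Notes on version B (the rewrite author's own statement) =====
-- stated objective: alternative
-- what changed: Instead of one accumulation pass updating a dict per character, B first extracts the distinct characters in first-appearance order with dict.fromkeys and then counts each one with a separate str.count scan.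
import Mathlib
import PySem

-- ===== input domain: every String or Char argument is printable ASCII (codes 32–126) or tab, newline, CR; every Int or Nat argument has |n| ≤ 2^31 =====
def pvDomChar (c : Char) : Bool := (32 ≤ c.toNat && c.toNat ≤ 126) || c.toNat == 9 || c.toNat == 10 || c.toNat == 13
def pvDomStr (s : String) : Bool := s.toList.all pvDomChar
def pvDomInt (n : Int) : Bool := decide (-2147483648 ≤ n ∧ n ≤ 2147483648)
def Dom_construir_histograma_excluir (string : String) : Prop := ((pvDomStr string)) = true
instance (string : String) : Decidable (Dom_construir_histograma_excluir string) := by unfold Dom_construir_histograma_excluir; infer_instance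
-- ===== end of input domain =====

-- B builds the histogram by listing the distinct characters first (dict.fromkeys) and
-- counting each with a separate string.count scan, instead of A's single accumulation pass.

-- ===== PORT A =====
def construir_histograma_excluir (string : String) : List (String × Int) :=
  (string.toList.foldl
    (fun h c =>
      let k := String.ofList [c]
      if h.contains k then h.insert k (h.getD k 0 + 1) else h.insert k 1)
    PySem.Dict.empty).items

-- ===== PORT B =====
def construir_histograma_excluir_alt (string : String) : List (String × Int) :=
  (PySem.List.dedup string.toList).map
    (fun c => (String.ofList [c], (PySem.Str.count string (String.ofList [c]) : Int)))

-- ===== PRECONDITION & SPEC =====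
def Spec_construir_histograma_excluir (string : String) (out : List (String × Int)) : Prop := out = construir_histograma_excluir_alt string
instance (string : String) (out : List (String × Int)) : Decidable (Spec_construir_histograma_excluir string out) := by unfold Spec_construir_histograma_excluir; infer_instance

-- ===== CLAIM (what is proved, stated in full; the proofs are below) =====
def Claim_equal_construir_histograma_excluir : Prop := ∀ (string : String), Dom_construir_histograma_excluir string → Spec_construir_histograma_excluir string (construir_histograma_excluir string)

-- ===== LEMMAS AND PROOFS =====

-- the fuel-driven substring scanner of PySem.Chars.count, on a one-character needle, is List.count
theorem pvCountGoSingle (c : Char) : ∀ (l : List Char) (fuel acc : Nat), l.length ≤ fuel →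
    PySem.Chars.count.go [c] fuel l acc = acc + l.count c := by
  intro l
  induction l with
  | nil => intro fuel acc h; cases fuel <;> simp [PySem.Chars.count.go]
  | cons x t ih =>
    intro fuel acc h
    cases fuel with
    | zero => simp at h
    | succ n =>
      rw [PySem.Chars.count.go]
      by_cases hc : c = x
      · subst hc
        simp [List.isPrefixOf, ih n (acc + 1) (by simpa using h)]
        omega
      · simp [List.isPrefixOf, hc, Ne.symm hc, ih n acc (by simpa using h)]

theorem pvCountSingle (s : List Char) (c : Char) : PySem.Chars.count s [c] = s.count c := by
  simp [PySem.Chars.count, pvCountGoSingle c s s.length 0 le_rfl]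

-- A's if-in-then-increment-else-set step is exactly the Counter step
theorem pvStepEq {κ : Type} [BEq κ] [LawfulBEq κ] (d : PySem.Dict κ Int) (k : κ) :
    (if d.contains k then d.insert k (d.getD k 0 + 1) else d.insert k 1)
      = d.insert k (d.getD k 0 + 1) := by
  by_cases h : d.contains k
  · simp [h]
  · simp [h, PySem.Dict.getD_of_not_contains d 0 (by simpa using h)]

-- building a set from mapped elements, with an injective map, maps the set
theorem pvFoldlAddMapInj {α β : Type} [BEq α] [LawfulBEq α] [BEq β] [LawfulBEq β]
    (f : α → β) (hf : Function.Injective f) (l : List α) (s : List α) :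
    (l.map f).foldl PySem.Set.add (s.map f) = (l.foldl PySem.Set.add s).map f := by
  induction l generalizing s with
  | nil => rfl
  | cons x t ih =>
    have hc : (s.map f).contains (f x) = s.contains x := by
      simp [hf.eq_iff]
    have hadd : PySem.Set.add (s.map f) (f x) = (PySem.Set.add s x).map f := by
      simp only [PySem.Set.add, PySem.Set.contains, hc]
      split <;> simp
    simp only [List.map_cons, List.foldl_cons, hadd, ih]

theorem pvMkSingleInj : Function.Injective (fun c : Char => String.ofList [c]) := by
  intro a b h
  have := congrArg String.toList h
  simpa using this

-- ===== VERDICT (by name: the statement is the Claim_ definition above) =====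
theorem construir_histograma_excluir_spec : Claim_equal_construir_histograma_excluir := by
  intro s _
  unfold Spec_construir_histograma_excluir construir_histograma_excluir construir_histograma_excluir_alt
  set l := s.toList with hl
  set f := fun c : Char => String.ofList [c] with hfdef
  -- A's loop over chars is the Counter of the mapped keys
  have hA : (l.foldl
      (fun h c =>
        let k := String.ofList [c]
        if h.contains k then h.insert k (h.getD k 0 + 1) else h.insert k 1)
      PySem.Dict.empty)
      = PySem.Dict.counter (l.map f) := by
    rw [← PySem.Dict.foldl_insert_getD_add_one_eq_counter, List.foldl_map]
    congr 1
    funext d c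
    exact pvStepEq d (f c)
  rw [hA, PySem.Dict.items_counter]
  have hset : PySem.Set.ofList (l.map f) = (PySem.Set.ofList l).map f := by
    simpa [PySem.Set.ofList] using pvFoldlAddMapInj f pvMkSingleInj l []
  rw [hset, List.map_map, PySem.List.dedup_eq_ofList]
  apply List.map_congr_left
  intro c _
  simp only [Function.comp, hfdef]
  congr 1
  rw [List.count_map_of_injective l _ pvMkSingleInj c,
    PySem.Str.count_eq]
  simp [pvCountSingle, ← hl]
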